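-- pv_equiv track=rewrite | github.com/snissn/back-goes-backwards | medical-foundation/newgen/run_json.py | get_sibling_context
-- ===== SOURCE A (Python) =====
-- def get_sibling_context(parent_node, current_key):
--     """Returns (prev_heading, prev_desc, next_heading, next_desc) for siblings, or None if not found."""
--     # Only consider keys that are sections (not title/description)
--     keys = [k for k in parent_node.keys() if isinstance(parent_node[k], dict) and "description" in parent_node[k]]
--     if current_key not in keys:
--         return None, None, None, None
--     idx = keys.index(current_key)
--     prev_key, next_key = None, None
--     if idx > 0:
--         prev_key = keys[idx - 1]
--     if idx < len(keys) - 1: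
--         next_key = keys[idx + 1]
--     prev = (
--         prev_key,
--         parent_node[prev_key].get("description") if prev_key else None,
--     ) if prev_key else (None, None)
--     next_ = (
--         next_key,
--         parent_node[next_key].get("description") if next_key else None,
--     ) if next_key else (None, None)
--     return prev[0], prev[1], next_[0], next_[1]
-- ===== SOURCE B (Python) =====
-- def get_sibling_context(parent_node, current_key):
--     """Returns (prev_heading, prev_desc, next_heading, next_desc) for siblings, or None if not found."""
--     prev_key = None
--     next_key = None
--     found = False
--     for k, v in parent_node.items():
--         if not (isinstance(v, dict) and "description" in v):
--             continue
--         if found: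
--             next_key = k
--             break
--         if k == current_key:
--             found = True
--         else:
--             prev_key = k
--     if not found:
--         return None, None, None, None
--
--     def field(key):
--         if key:
--             return key, parent_node[key].get("description")
--         return None, None
--
--     pk, pd = field(prev_key)
--     nk, nd = field(next_key)
--     return pk, pd, nk, nd
-- ===== Notes on version B (the rewrite author's own statement) =====
-- stated objective: alternative
-- what changed: Replaces A's build-the-filtered-key-list, membership test and .index() passes with a single ordered pass over the items that tracks the previous qualifying key and breaks as soon as the next qualifying key is seen.
import Mathlib
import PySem

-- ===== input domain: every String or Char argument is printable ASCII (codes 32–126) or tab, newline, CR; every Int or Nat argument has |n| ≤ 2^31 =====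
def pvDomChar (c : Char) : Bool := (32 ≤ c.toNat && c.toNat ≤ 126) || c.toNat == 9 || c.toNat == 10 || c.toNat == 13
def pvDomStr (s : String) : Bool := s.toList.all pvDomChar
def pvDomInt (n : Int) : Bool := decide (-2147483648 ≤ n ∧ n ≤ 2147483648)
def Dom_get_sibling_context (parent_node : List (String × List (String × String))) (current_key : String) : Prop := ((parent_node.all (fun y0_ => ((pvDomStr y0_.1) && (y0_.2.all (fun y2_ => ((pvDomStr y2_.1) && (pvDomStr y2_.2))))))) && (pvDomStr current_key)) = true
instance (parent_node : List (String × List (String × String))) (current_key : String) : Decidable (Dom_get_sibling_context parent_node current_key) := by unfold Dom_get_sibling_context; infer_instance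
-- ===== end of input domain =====

-- B replaces A's filtered-key-list + index arithmetic by a single ordered pass tracking the
-- previous qualifying key (alternative decomposition, same cost; equivalence proved on
-- association lists with duplicate-free keys).

-- ===== PORT A =====
-- literal transliteration of A: build the filtered key list, test membership, take index,
-- index-arithmetic neighbours, then the falsy-guarded field pairs.
def get_sibling_context (parent_node : List (String × List (String × String))) (current_key : String) : Option String × Option String × Option String × Option String :=
  let d : PySem.Dict String (List (String × String)) := ⟨parent_node⟩
  let keys := d.keys.filter (fun k => (PySem.Dict.mk (d.getD k [])).contains "description")
  if current_key ∈ keys then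
    let idx := (PySem.List.index? keys current_key).getD 0
    let prev_key : Option String := if 0 < idx then some (PySem.List.pyGetD keys ((idx : Int) - 1) "") else none
    let next_key : Option String := if idx < keys.length - 1 then some (PySem.List.pyGetD keys ((idx : Int) + 1) "") else none
    let prev : Option String × Option String :=
      match prev_key with
      | some k => if k ≠ "" then (some k, (PySem.Dict.mk (d.getD k [])).get? "description") else (none, none)
      | none => (none, none)
    let next_ : Option String × Option String :=
      match next_key with
      | some k => if k ≠ "" then (some k, (PySem.Dict.mk (d.getD k [])).get? "description") else (none, none)
      | none => (none, none)
    (prev.1, prev.2, next_.1, next_.2)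
  else (none, none, none, none)

-- ===== PORT B =====
-- the 'found' flag of Source B's loop becomes which phase we are in: sibScan is the not-yet-found
-- phase; after the match the loop only looks for the next qualifying key (sibNextKey).
def sibQual (p : String × List (String × String)) : Bool := (PySem.Dict.mk p.2).contains "description"

def sibNextKey (rest : List (String × List (String × String))) : Option String :=
  (rest.find? sibQual).map (·.1)

def sibScan : List (String × List (String × String)) → String → Option String → Option (Option String × Option String)
  | [], _, _ => none
  | (k, v) :: rest, ck, prev =>
    if sibQual (k, v) then
      if k = ck then some (prev, sibNextKey rest)
      else sibScan rest ck (some k)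
    else sibScan rest ck prev

-- Source B's local 'field' closure (Python truthiness: None and "" are falsy)
def sibField (parent_node : List (String × List (String × String))) (key? : Option String) : Option String × Option String :=
  match key? with
  | some k => if k ≠ "" then (some k, (PySem.Dict.mk ((PySem.Dict.mk parent_node).getD k [])).get? "description") else (none, none)
  | none => (none, none)

def get_sibling_context_alt (parent_node : List (String × List (String × String))) (current_key : String) : Option String × Option String × Option String × Option String :=
  match sibScan parent_node current_key none with
  | none => (none, none, none, none)
  | some (pk, nk) =>
    let p := sibField parent_node pk
    let n := sibField parent_node nk
    (p.1, p.2, n.1, n.2)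

-- ===== PRECONDITION & SPEC =====
-- Pre_ excludes association lists with duplicate keys (at either level): no Python dict can
-- represent them — dict construction collapses duplicates (last value wins) — so any value on
-- such lists is an artefact of the encoding, not of A.
def Pre_get_sibling_context (parent_node : List (String × List (String × String))) (current_key : String) : Prop :=
  (parent_node.map Prod.fst).Nodup ∧ ∀ p ∈ parent_node, (p.2.map Prod.fst).Nodup
instance (parent_node : List (String × List (String × String))) (current_key : String) : Decidable (Pre_get_sibling_context parent_node current_key) := by unfold Pre_get_sibling_context; infer_instance

def pvWitness_get_sibling_context : (List (String × List (String × String))) × String :=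
  ([("intro", [("description", "Opening")]), ("body", [("description", "Main")]), ("end", [("description", "Close")])], "body")

def Spec_get_sibling_context (parent_node : List (String × List (String × String))) (current_key : String) (out : Option String × Option String × Option String × Option String) : Prop := out = get_sibling_context_alt parent_node current_key
instance (parent_node : List (String × List (String × String))) (current_key : String) (out : Option String × Option String × Option String × Option String) : Decidable (Spec_get_sibling_context parent_node current_key out) := by unfold Spec_get_sibling_context; infer_instance

-- ===== CLAIM (what is proved, stated in full; the proofs are below) =====
def Claim_equal_get_sibling_context : Prop := ∀ (parent_node : List (String × List (String × String))) (current_key : String), Dom_get_sibling_context parent_node current_key → Pre_get_sibling_context parent_node current_key → Spec_get_sibling_context parent_node current_key (get_sibling_context parent_node current_key)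

-- ===== LEMMAS AND PROOFS =====

-- sibScan seen on the filtered key list only
def kScan : List String → String → Option String → Option (Option String × Option String)
  | [], _, _ => none
  | k :: ks, ck, prev => if k = ck then some (prev, ks.head?) else kScan ks ck (some k)

theorem sibNextKey_eq (rest : List (String × List (String × String))) :
    sibNextKey rest = ((rest.filter sibQual).map Prod.fst).head? := by
  induction rest with
  | nil => rfl
  | cons p rest ih =>
    by_cases h : sibQual p
    · simp only [sibNextKey, List.find?_cons, List.filter_cons, h, cond_true, if_pos,
        Option.map_some, List.map_cons, List.head?_cons]
    · simp only [sibNextKey, List.find?_cons, List.filter_cons, h, cond_false] at ih ⊢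
      rw [if_neg (by simp [h])] at *
      exact ih

theorem sibScan_eq (pn : List (String × List (String × String))) (ck : String) (prev : Option String) :
    sibScan pn ck prev = kScan ((pn.filter sibQual).map Prod.fst) ck prev := by
  induction pn generalizing prev with
  | nil => rfl
  | cons p rest ih =>
    obtain ⟨k, v⟩ := p
    by_cases h : sibQual (k, v)
    · simp [sibScan, h, List.filter_cons, kScan, sibNextKey_eq, ih]
    · simp [sibScan, h, List.filter_cons, ih]

theorem kScan_not_mem (ks : List String) (ck : String) (prev : Option String) (h : ck ∉ ks) :
    kScan ks ck prev = none := by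
  induction ks generalizing prev with
  | nil => rfl
  | cons k ks ih =>
    simp only [List.mem_cons, not_or] at h
    simp [kScan, Ne.symm h.1, ih _ h.2]

theorem kScan_split (pre suf : List String) (ck : String) (p : Option String) (h : ck ∉ pre) :
    kScan (pre ++ ck :: suf) ck p = some (pre.getLast?.or p, suf.head?) := by
  induction pre generalizing p with
  | nil => simp [kScan]
  | cons k pre ih =>
    simp only [List.mem_cons, not_or] at h
    rw [List.cons_append]
    show kScan (k :: (pre ++ ck :: suf)) ck p = _
    rw [kScan, if_neg (Ne.symm h.1), ih _ h.2]
    cases pre with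
    | nil => simp
    | cons a l =>
      have hs : ((a :: l).getLast?).isSome := by simp
      obtain ⟨g, hg⟩ := Option.isSome_iff_exists.mp hs
      simp [List.getLast?_cons_cons, hg]

-- the filtered key list as A computes it, under duplicate-free keys
theorem keysA_eq (pn : List (String × List (String × String))) (hnd : (pn.map Prod.fst).Nodup) :
    ((PySem.Dict.mk pn).keys.filter
        (fun k => (PySem.Dict.mk ((PySem.Dict.mk pn).getD k [])).contains "description"))
      = (pn.filter sibQual).map Prod.fst := by
  induction pn with
  | nil => rfl
  | cons p rest ih =>
    obtain ⟨k, v⟩ := p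
    simp only [List.map_cons, List.nodup_cons] at hnd
    have hk : (PySem.Dict.mk ((k, v) :: rest)).getD k [] = v := by
      simp [PySem.Dict.getD, PySem.Dict.get?, List.find?]
    have hrest : ∀ k' ∈ rest.map Prod.fst,
        (PySem.Dict.mk ((k, v) :: rest)).getD k' [] = (PySem.Dict.mk rest).getD k' [] := by
      intro k' hk'
      have : k' ≠ k := fun h => hnd.1 (h ▸ hk')
      have hb : (k == k') = false := by simpa using Ne.symm this
      simp [PySem.Dict.getD, PySem.Dict.get?, List.find?_cons, hb]
    have hcongr : (rest.map Prod.fst).filter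
          (fun k' => (PySem.Dict.mk ((PySem.Dict.mk ((k, v) :: rest)).getD k' [])).contains "description")
        = (rest.map Prod.fst).filter
          (fun k' => (PySem.Dict.mk ((PySem.Dict.mk rest).getD k' [])).contains "description") := by
      apply List.filter_congr
      intro k' hk'
      rw [hrest k' hk']
    by_cases h : sibQual (k, v)
    · simp only [sibQual] at h
      simp only [PySem.Dict.keys, PySem.Dict.items, List.map_cons, List.filter_cons, hk, h,
        List.filter_cons_of_pos]
      rw [hcongr]
      simp only [List.filter_cons, sibQual, h, List.map_cons, List.cons.injEq, true_and]
      simpa [PySem.Dict.keys, PySem.Dict.contains] using ih hnd.2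
    · simp only [sibQual] at h
      simp only [PySem.Dict.keys, PySem.Dict.items, List.map_cons, List.filter_cons, hk]
      rw [if_neg (by simpa using h)]
      rw [hcongr]
      simp only [List.filter_cons, sibQual, h, Bool.false_eq_true, if_false]
      simpa [PySem.Dict.keys, PySem.Dict.contains] using ih hnd.2

-- ===== VERDICT (by name: the statement is the Claim_ definition above) =====
theorem get_sibling_context_spec : Claim_equal_get_sibling_context := by
  intro pn ck _hdom hpre
  unfold Spec_get_sibling_context
  obtain ⟨hnd, -⟩ := hpre
  simp only [get_sibling_context, get_sibling_context_alt]
  rw [sibScan_eq, keysA_eq pn hnd]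
  by_cases hmem : ck ∈ (pn.filter sibQual).map Prod.fst
  case neg => rw [if_neg hmem, kScan_not_mem _ ck none hmem]
  case pos =>
  rw [if_pos hmem]
  rcases Option.isSome_iff_exists.mp ((PySem.List.index?_isSome_iff _ _).mpr hmem) with ⟨i, hi⟩
  obtain ⟨pre, suf, hsplit, hlen, hnotmem⟩ := (PySem.List.index?_eq_some_iff _ _ _).mp hi
  rw [hi, Option.getD_some, hsplit, kScan_split pre suf ck none hnotmem]
  have hprev : (if 0 < i then some (PySem.List.pyGetD (pre ++ ck :: suf) ((i : Int) - 1) "") else none)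
      = pre.getLast?.or none := by
    by_cases hp : 0 < i
    · rw [if_pos hp]
      cases pre with
      | nil => simp at hlen; omega
      | cons a l =>
        have hl1 : l.length + 1 = i := by simpa using hlen
        have e1 : ((i : Int) - 1) = ((l.length : Nat) : Int) := by omega
        rw [e1, PySem.List.pyGetD_natCast, List.getD_eq_getElem?_getD,
            List.getElem?_append_left (by simp)]
        rw [List.getLast?_eq_getElem?, Option.or_none]
        have hx : (a :: l)[l.length]? = some ((a :: l)[l.length]'(by simp)) :=
          List.getElem?_eq_getElem (by simp)
        simp only [List.length_cons, Nat.add_sub_cancel, hx, Option.getD_some]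
    · rw [if_neg hp]
      have hi0 : i = 0 := by omega
      cases pre with
      | nil => simp
      | cons a l => subst hi0; simp at hlen
  have hnext : (if i < (pre ++ ck :: suf).length - 1 then some (PySem.List.pyGetD (pre ++ ck :: suf) ((i : Int) + 1) "") else none)
      = suf.head? := by
    by_cases hs : i < (pre ++ ck :: suf).length - 1
    · rw [if_pos hs]
      cases suf with
      | nil => exfalso; simp at hs; omega
      | cons b t =>
        have e1 : ((i : Int) + 1) = ((pre.length + 1 : Nat) : Int) := by
          have : pre.length = i := hlen
          omega
        rw [e1, PySem.List.pyGetD_natCast, List.getD_eq_getElem?_getD]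
        rw [show pre ++ ck :: b :: t = (pre ++ [ck]) ++ b :: t by simp]
        rw [List.getElem?_append_right (by simp)]
        simp
    · rw [if_neg hs]
      cases suf with
      | nil => simp
      | cons b t => exfalso; simp at hs; omega
  rw [hprev, hnext]
  cases hpk : pre.getLast?.or none <;> cases hnk : suf.head? <;> simp [sibField]
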